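-- pv_equiv track=rewrite | github.com/tanuki-create/datascience | leetcode/easy/006_house_robber/solution.py | rob_with_path
-- ===== SOURCE A (Python) =====
-- def rob_with_path(nums):
--     """
--     Find maximum amount and return the houses that should be robbed.
--
--     Args:
--         nums: List of money in each house
--
--     Returns:
--         tuple: (max_amount, list_of_house_indices)
--     """
--     if not nums:
--         return 0, []
--
--     if len(nums) == 1:
--         return nums[0], [0]
--
--     # Track both the maximum amount and the path
--     dp = [(0, []) for _ in range(len(nums))]
--     dp[0] = (nums[0], [0])
--     dp[1] = (max(nums[0], nums[1]), [1] if nums[1] > nums[0] else [0])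
--
--     for i in range(2, len(nums)):
--         # Option 1: Rob current house + max from 2 houses ago
--         option1_amount = dp[i-2][0] + nums[i]
--         option1_path = dp[i-2][1] + [i]
--
--         # Option 2: Don't rob current house, take max from previous house
--         option2_amount = dp[i-1][0]
--         option2_path = dp[i-1][1]
--
--         if option1_amount > option2_amount:
--             dp[i] = (option1_amount, option1_path)
--         else:
--             dp[i] = (option2_amount, option2_path)
--
--     return dp[-1]
-- ===== SOURCE B (Python) =====
-- def rob_with_path(nums):
--     """O(n) house robber: DP over amounts only, then reconstruct the chosen
--     house indices by backtracking with the same tie-break (skip on ties)."""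
--     if not nums:
--         return 0, []
--     if len(nums) == 1:
--         return nums[0], [0]
--     n = len(nums)
--     amts = [nums[0], max(nums[0], nums[1])]
--     for i in range(2, n):
--         amts.append(max(amts[-1], amts[-2] + nums[i]))
--     path = []
--     i = n - 1
--     while i >= 2:
--         if amts[i] == amts[i - 1]:
--             i -= 1
--         else:
--             path.append(i)
--             i -= 2
--     if i == 1:
--         path.append(1 if nums[1] > nums[0] else 0)
--     elif i == 0:
--         path.append(0)
--     path.reverse()
--     return amts[-1], path
-- ===== Notes on version B (the rewrite author's own statement) =====
-- stated objective: faster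
-- what changed: A stores a full (amount, path) pair per house and copies the partial path on every step (O(n^2) time/space); B runs an amounts-only DP and reconstructs the robbed indices afterwards by backtracking over the amounts array with the same skip-on-tie rule, in O(n).
import Mathlib
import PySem

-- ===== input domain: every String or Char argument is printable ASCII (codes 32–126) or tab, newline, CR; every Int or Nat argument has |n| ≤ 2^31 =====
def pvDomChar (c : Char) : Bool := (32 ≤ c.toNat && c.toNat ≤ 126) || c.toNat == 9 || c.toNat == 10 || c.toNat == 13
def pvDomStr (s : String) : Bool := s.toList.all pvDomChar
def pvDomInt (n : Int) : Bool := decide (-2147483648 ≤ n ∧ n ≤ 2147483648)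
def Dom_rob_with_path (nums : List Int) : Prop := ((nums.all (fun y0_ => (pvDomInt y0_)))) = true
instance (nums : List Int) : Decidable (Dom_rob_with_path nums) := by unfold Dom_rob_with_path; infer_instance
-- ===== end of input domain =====

-- B changes A's O(n^2) path-copying DP into an O(n) amounts-only DP with backtracking
-- reconstruction (same tie-break); objective: faster, asymptotic.

-- ===== PORT A =====
-- Transliteration of A: preallocated dp list of (amount, path) pairs, loop i = 2..n-1.
-- dp/nums indices read inside the loop are always in range, so getD is exact there.
def rob_with_path (nums : List Int) : Int × List Int :=
  if nums = [] then (0, [])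
  else if nums.length = 1 then (nums.getD 0 0, [0])
  else
    let n : Nat := nums.length
    let dp0 : List (Int × List Int) := List.replicate n (0, ([] : List Int))
    let dp1 := dp0.set 0 (nums.getD 0 0, [(0 : Int)])
    let dp2 := dp1.set 1 (max (nums.getD 0 0) (nums.getD 1 0),
                          if nums.getD 1 0 > nums.getD 0 0 then [(1 : Int)] else [(0 : Int)])
    let dp := (PySem.List.pyRange 2 (n : Int) 1).foldl (fun dp i =>
        let option1_amount := (dp.getD (i - 2).toNat (0, [])).1 + nums.getD i.toNat 0
        let option1_path := (dp.getD (i - 2).toNat (0, [])).2 ++ [i]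
        let option2_amount := (dp.getD (i - 1).toNat (0, [])).1
        let option2_path := (dp.getD (i - 1).toNat (0, [])).2
        if option1_amount > option2_amount then dp.set i.toNat (option1_amount, option1_path)
        else dp.set i.toNat (option2_amount, option2_path)) dp2
    dp.getD (n - 1) (0, [])

-- ===== PORT B =====
-- B-side helper: the `while i >= 2` backtracking loop of Source B, with the trailing
-- i == 1 / i == 0 appends; amts/nums indices reached are always in range, so getD is exact.
def btAlt (nums amts : List Int) : Nat → List Int → List Int
  | i, path =>
    if 2 ≤ i then
      if amts.getD i 0 = amts.getD (i - 1) 0 then btAlt nums amts (i - 1) path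
      else btAlt nums amts (i - 2) (path ++ [(i : Int)])
    else if i = 1 then path ++ [if nums.getD 1 0 > nums.getD 0 0 then (1 : Int) else 0]
    else path ++ [(0 : Int)]
  termination_by i => i
  decreasing_by all_goals omega

def rob_with_path_alt (nums : List Int) : Int × List Int :=
  if nums = [] then (0, [])
  else if nums.length = 1 then (nums.getD 0 0, [0])
  else
    let n : Nat := nums.length
    let amts0 : List Int := [nums.getD 0 0, max (nums.getD 0 0) (nums.getD 1 0)]
    let amts := (PySem.List.pyRange 2 (n : Int) 1).foldl (fun a i =>
        a ++ [max (a.getD (a.length - 1) 0) (a.getD (a.length - 2) 0 + nums.getD i.toNat 0)]) amts0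
    let path := btAlt nums amts (n - 1) []
    (amts.getD (amts.length - 1) 0, path.reverse)

-- ===== PRECONDITION & SPEC =====
def Spec_rob_with_path (nums : List Int) (out : Int × List Int) : Prop := out = rob_with_path_alt nums
instance (nums : List Int) (out : Int × List Int) : Decidable (Spec_rob_with_path nums out) := by unfold Spec_rob_with_path; infer_instance

-- ===== CLAIM (what is proved, stated in full; the proofs are below) =====
def Claim_equal_rob_with_path : Prop := ∀ (nums : List Int), Dom_rob_with_path nums → Spec_rob_with_path nums (rob_with_path nums)

-- ===== LEMMAS AND PROOFS =====

-- Mathematical recurrence shared by both proofs: dp cell i of A.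
def dpa (nums : List Int) : Nat → Int × List Int
  | 0 => (nums.getD 0 0, [(0 : Int)])
  | 1 => (max (nums.getD 0 0) (nums.getD 1 0),
          if nums.getD 1 0 > nums.getD 0 0 then [(1 : Int)] else [(0 : Int)])
  | (i + 2) =>
      if (dpa nums i).1 + nums.getD (i + 2) 0 > (dpa nums (i + 1)).1 then
        ((dpa nums i).1 + nums.getD (i + 2) 0, (dpa nums i).2 ++ [((i : Int) + 2)])
      else dpa nums (i + 1)

theorem dpa_fst (nums : List Int) (i : Nat) :
    (dpa nums (i + 2)).1 = max ((dpa nums (i + 1)).1) ((dpa nums i).1 + nums.getD (i + 2) 0) := by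
  simp only [dpa]
  split_ifs with h <;> omega

theorem dpa_fst_lt (nums : List Int) (i : Nat) :
    ((dpa nums (i + 2)).1 = (dpa nums (i + 1)).1) ↔
      ¬ ((dpa nums i).1 + nums.getD (i + 2) 0 > (dpa nums (i + 1)).1) := by
  have := dpa_fst nums i
  constructor
  · intro h; omega
  · intro h; omega

theorem dpa_snd_skip (nums : List Int) (i : Nat)
    (h : ¬ ((dpa nums i).1 + nums.getD (i + 2) 0 > (dpa nums (i + 1)).1)) :
    dpa nums (i + 2) = dpa nums (i + 1) := by
  rw [dpa, if_neg h]

theorem dpa_take (nums : List Int) (i : Nat)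
    (h : (dpa nums i).1 + nums.getD (i + 2) 0 > (dpa nums (i + 1)).1) :
    dpa nums (i + 2) = ((dpa nums i).1 + nums.getD (i + 2) 0, (dpa nums i).2 ++ [((i : Int) + 2)]) := by
  rw [dpa, if_pos h]

-- ===== A-side: the fold over pyRange 2 m yields dpa on every filled cell =====

theorem a_fold_inv (nums : List Int) (hn : 2 ≤ nums.length) (m : Nat)
    (hm2 : 2 ≤ m) (hmn : m ≤ nums.length) :
    let n := nums.length
    let dp0 : List (Int × List Int) := List.replicate n (0, ([] : List Int))
    let dp1 := dp0.set 0 (nums.getD 0 0, [(0 : Int)])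
    let dp2 := dp1.set 1 (max (nums.getD 0 0) (nums.getD 1 0),
                          if nums.getD 1 0 > nums.getD 0 0 then [(1 : Int)] else [(0 : Int)])
    let L := (PySem.List.pyRange 2 (m : Int) 1).foldl (fun dp i =>
        let option1_amount := (dp.getD (i - 2).toNat (0, [])).1 + nums.getD i.toNat 0
        let option1_path := (dp.getD (i - 2).toNat (0, [])).2 ++ [i]
        let option2_amount := (dp.getD (i - 1).toNat (0, [])).1
        let option2_path := (dp.getD (i - 1).toNat (0, [])).2
        if option1_amount > option2_amount then dp.set i.toNat (option1_amount, option1_path)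
        else dp.set i.toNat (option2_amount, option2_path)) dp2
    L.length = nums.length ∧ ∀ j < m, L.getD j (0, []) = dpa nums j := by
  intro n dp0 dp1 dp2 L
  induction m with
  | zero => omega
  | succ m ih =>
    by_cases hm : 2 ≤ m
    · -- inductive step: pyRange 2 (m+1) = pyRange 2 m ++ [m]
      have hsplit : PySem.List.pyRange 2 ((m : Int) + 1) 1
          = PySem.List.pyRange 2 (m : Int) 1 ++ [(m : Int)] := by
        exact PySem.List.pyRange_one_succ_right (by exact_mod_cast hm)
      obtain ⟨hlen, hget⟩ := ih hm (by omega)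
      set step := (fun (dp : List (Int × List Int)) (i : Int) =>
        let option1_amount := (dp.getD (i - 2).toNat (0, [])).1 + nums.getD i.toNat 0
        let option1_path := (dp.getD (i - 2).toNat (0, [])).2 ++ [i]
        let option2_amount := (dp.getD (i - 1).toNat (0, [])).1
        let option2_path := (dp.getD (i - 1).toNat (0, [])).2
        if option1_amount > option2_amount then dp.set i.toNat (option1_amount, option1_path)
        else dp.set i.toNat (option2_amount, option2_path)) with hstep
      set L0 := (PySem.List.pyRange 2 (m : Int) 1).foldl step dp2 with hL0
      have hLeq : L = step L0 (m : Int) := by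
        show (PySem.List.pyRange 2 ((m : Int) + 1) 1).foldl step dp2 = _
        rw [hsplit, List.foldl_append]; rfl
      -- evaluate the step
      have ht2 : ((m : Int) - 2).toNat = m - 2 := by omega
      have ht1 : ((m : Int) - 1).toNat = m - 1 := by omega
      have htm : ((m : Int)).toNat = m := by omega
      have hg2 : L0.getD (m - 2) (0, []) = dpa nums (m - 2) := hget _ (by omega)
      have hg1 : L0.getD (m - 1) (0, []) = dpa nums (m - 1) := hget _ (by omega)
      have hmlt : m < L0.length := by omega
      have key : step L0 (m : Int) =
          if (dpa nums (m - 2)).1 + nums.getD m 0 > (dpa nums (m - 1)).1 then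
            L0.set m ((dpa nums (m - 2)).1 + nums.getD m 0, (dpa nums (m - 2)).2 ++ [(m : Int)])
          else L0.set m ((dpa nums (m - 1)).1, (dpa nums (m - 1)).2) := by
        simp only [hstep, ht2, ht1, htm, hg2, hg1]
      have hdpam : dpa nums m =
          if (dpa nums (m - 2)).1 + nums.getD m 0 > (dpa nums (m - 1)).1 then
            ((dpa nums (m - 2)).1 + nums.getD m 0, (dpa nums (m - 2)).2 ++ [(m : Int)])
          else ((dpa nums (m - 1)).1, (dpa nums (m - 1)).2) := by
        obtain ⟨k, hk⟩ : ∃ k, m = k + 2 := ⟨m - 2, by omega⟩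
        subst hk
        simp only [Nat.add_sub_cancel, show k + 2 - 1 = k + 1 from by omega]
        split_ifs with h
        · rw [dpa_take nums k h]; norm_num
        · rw [dpa_snd_skip nums k h]
      constructor
      · rw [hLeq, key]; split_ifs <;> simp [hlen]
      · intro j hj
        rw [hLeq, key]
        by_cases hjm : j = m
        · subst hjm
          rw [hdpam]
          split_ifs <;> simp [List.getD_eq_getElem?_getD, List.getElem?_set_self hmlt]
        · have hjlt : j < m := by omega
          have : ∀ (v : Int × List Int), (L0.set m v).getD j (0, []) = L0.getD j (0, []) := by
            intro v
            simp [List.getD_eq_getElem?_getD, List.getElem?_set_ne (by omega : m ≠ j)]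
          split_ifs <;> rw [this] <;> exact hget j hjlt
    · -- base: m + 1 = 2 exactly (since 2 ≤ m+1 and ¬ 2 ≤ m), fold over empty range
      have hm1 : m = 1 := by omega
      subst hm1
      have hnil : PySem.List.pyRange 2 (((1 : Nat) + 1 : Nat) : Int) 1 = [] := by
        norm_num [PySem.List.pyRange_one_eq_nil]
      have hLeq : L = dp2 := by
        simp only [L, hnil, List.foldl_nil]
      have hlen2 : dp2.length = nums.length := by
        simp [dp2, dp1, dp0, n]
      refine ⟨by rw [hLeq]; exact hlen2, ?_⟩
      intro j hj
      have hn0 : 0 < nums.length := by omega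
      have hn1 : 1 < nums.length := by omega
      rw [hLeq]
      interval_cases j <;>
        simp [dp2, dp1, dp0, n, dpa, List.getD_eq_getElem?_getD, hn0, hn1]

theorem rob_with_path_eq_dpa (nums : List Int) (hn : 2 ≤ nums.length) :
    rob_with_path nums = dpa nums (nums.length - 1) := by
  have hne : nums ≠ [] := by intro h; simp [h] at hn
  have hne1 : nums.length ≠ 1 := by omega
  obtain ⟨hlen, hget⟩ := a_fold_inv nums hn (nums.length) hn (le_refl _)
  simp only [rob_with_path, if_neg hne, if_neg hne1]
  exact hget (nums.length - 1) (by omega)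

-- ===== B-side: the amounts fold builds (range m).map (fst ∘ dpa) =====

theorem b_fold_inv (nums : List Int) (_hn : 2 ≤ nums.length) (m : Nat)
    (hm2 : 2 ≤ m) (hmn : m ≤ nums.length) :
    (PySem.List.pyRange 2 (m : Int) 1).foldl (fun a i =>
        a ++ [max (a.getD (a.length - 1) 0) (a.getD (a.length - 2) 0 + nums.getD i.toNat 0)])
      [nums.getD 0 0, max (nums.getD 0 0) (nums.getD 1 0)]
    = (List.range m).map (fun j => (dpa nums j).1) := by
  induction m with
  | zero => omega
  | succ m ih =>
    by_cases hm : 2 ≤ m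
    · have hsplit : PySem.List.pyRange 2 ((m : Int) + 1) 1
          = PySem.List.pyRange 2 (m : Int) 1 ++ [(m : Int)] :=
        PySem.List.pyRange_one_succ_right (by exact_mod_cast hm)
      have ihm := ih hm (by omega)
      push_cast
      rw [hsplit, List.foldl_append, ihm]
      simp only [List.foldl_cons, List.foldl_nil]
      have hlen : ((List.range m).map (fun j => (dpa nums j).1)).length = m := by simp
      have hg : ∀ k, k < m →
          ((List.range m).map (fun j => (dpa nums j).1)).getD k 0 = (dpa nums k).1 := by
        intro k hk
        simp [List.getD_eq_getElem?_getD, List.getElem?_map, List.getElem?_range hk]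
      rw [hlen]
      rw [hg (m - 1) (by omega), hg (m - 2) (by omega)]
      have htm : ((m : Int)).toNat = m := by omega
      rw [htm]
      obtain ⟨k, hk⟩ : ∃ k, m = k + 2 := ⟨m - 2, by omega⟩
      subst hk
      conv_rhs => rw [List.range_succ, List.map_append]
      simp only [show k + 2 - 1 = k + 1 from by omega, Nat.add_sub_cancel,
        List.map_cons, List.map_nil, dpa_fst nums k]
    · have hm1 : m = 1 := by omega
      subst hm1
      have hnil : PySem.List.pyRange 2 (2 : Int) 1 = [] :=
        PySem.List.pyRange_one_eq_nil (by norm_num)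
      push_cast
      rw [hnil]
      simp [List.range_succ, dpa]

-- amts lookups equal dpa amounts
theorem amts_getD (nums : List Int) (n : Nat) (k : Nat) (hk : k < n) :
    ((List.range n).map (fun j => (dpa nums j).1)).getD k 0 = (dpa nums k).1 := by
  simp [List.getD_eq_getElem?_getD, List.getElem?_map, List.getElem?_range hk]

-- The backtracking loop reconstructs exactly A's path (reversed), for any accumulator.
theorem btAlt_eq (nums : List Int) (n : Nat) (_hn : 2 ≤ n) :
    ∀ i, i < n → ∀ path,
      btAlt nums ((List.range n).map (fun j => (dpa nums j).1)) i path
        = path ++ (dpa nums i).2.reverse := by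
  intro i
  induction i using Nat.strong_induction_on with
  | _ i ih =>
    intro hi path
    by_cases h2 : 2 ≤ i
    · obtain ⟨k, hk⟩ : ∃ k, i = k + 2 := ⟨i - 2, by omega⟩
      subst hk
      rw [btAlt]
      rw [if_pos h2]
      rw [amts_getD nums n (k + 2) hi, amts_getD nums n (k + 2 - 1) (by omega)]
      simp only [show k + 2 - 1 = k + 1 from by omega, show k + 2 - 2 = k from by omega]
      by_cases htake : (dpa nums k).1 + nums.getD (k + 2) 0 > (dpa nums (k + 1)).1
      · rw [if_neg (by rw [dpa_fst_lt]; tauto)]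
        rw [ih k (by omega) (by omega)]
        rw [dpa_take nums k htake]
        simp
      · rw [if_pos ((dpa_fst_lt nums k).mpr htake)]
        rw [ih (k + 1) (by omega) (by omega)]
        rw [dpa_snd_skip nums k htake]
    · rw [btAlt]
      rw [if_neg h2]
      interval_cases i
      · simp [dpa]
      · simp only [dpa]
        split_ifs <;> simp

theorem rob_with_path_alt_eq_dpa (nums : List Int) (hn : 2 ≤ nums.length) :
    rob_with_path_alt nums = dpa nums (nums.length - 1) := by
  have hne : nums ≠ [] := by intro h; simp [h] at hn
  have hne1 : nums.length ≠ 1 := by omega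
  simp only [rob_with_path_alt, if_neg hne, if_neg hne1]
  rw [b_fold_inv nums hn (nums.length) hn (le_refl _)]
  rw [btAlt_eq nums (nums.length) hn (nums.length - 1) (by omega) []]
  have hlen : ((List.range nums.length).map (fun j => (dpa nums j).1)).length = nums.length := by
    simp
  rw [hlen, amts_getD nums (nums.length) (nums.length - 1) (by omega)]
  simp

-- ===== VERDICT (by name: the statement is the Claim_ definition above) =====
theorem rob_with_path_spec : Claim_equal_rob_with_path := by
  intro nums _
  unfold Spec_rob_with_path
  by_cases h0 : nums = []
  · subst h0; rfl
  · by_cases h1 : nums.length = 1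
    · simp [rob_with_path, rob_with_path_alt, h0, h1]
    · have hn : 2 ≤ nums.length := by
        rcases nums with _ | ⟨a, _ | t⟩ <;> simp_all
      rw [rob_with_path_eq_dpa nums hn, rob_with_path_alt_eq_dpa nums hn]
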